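-- pv_equiv track=rewrite | github.com/dawnduan/aer1810_llm_paper | self_verify_paper.py | chunk_text_keys
-- ===== SOURCE A (Python) =====
-- def chunk_text_keys(keys, stepsize):
--     lis = []
--     sublis = []
--     for k in keys:
--         sublis += [k]
--         if k % 3 == 0:
--             lis.append(sublis)
--             sublis = []
--     return lis
-- ===== SOURCE B (Python) =====
-- def chunk_text_keys(keys, stepsize):
--     ks = list(keys)
--     cuts = [i + 1 for i, k in enumerate(ks) if k % 3 == 0]
--     return [ks[a:b] for a, b in zip([0] + cuts, cuts)]
-- ===== Notes on version B (the rewrite author's own statement) =====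
-- stated objective: alternative
-- what changed: Replaces the single accumulator loop (grow a sublist, flush on each multiple of 3) by a two-pass index-table scheme: first compute the list of cut positions after each multiple of 3, then slice the key list between consecutive cut points.
import Mathlib
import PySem

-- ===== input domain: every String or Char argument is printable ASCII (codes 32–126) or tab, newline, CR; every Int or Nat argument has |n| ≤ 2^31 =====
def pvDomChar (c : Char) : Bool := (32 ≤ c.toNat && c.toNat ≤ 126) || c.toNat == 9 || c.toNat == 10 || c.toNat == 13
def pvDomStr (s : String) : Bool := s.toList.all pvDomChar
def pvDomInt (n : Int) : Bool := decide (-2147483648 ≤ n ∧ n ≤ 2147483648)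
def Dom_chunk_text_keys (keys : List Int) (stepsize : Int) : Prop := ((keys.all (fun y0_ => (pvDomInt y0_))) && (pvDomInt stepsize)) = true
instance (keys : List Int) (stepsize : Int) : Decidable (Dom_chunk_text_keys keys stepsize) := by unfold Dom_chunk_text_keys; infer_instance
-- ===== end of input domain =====

-- B replaces A's accumulator loop by a two-pass scheme: a cut-index table, then slicing between
-- consecutive cuts (objective: alternative decomposition, same cost).

-- ===== PORT A =====
-- A: one loop with state (lis, sublis); sublis grows by [k], flushed into lis when k % 3 == 0.
def chunk_text_keys (keys : List Int) (stepsize : Int) : List (List Int) :=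
  let st := keys.foldl
    (fun (s : List (List Int) × List Int) k =>
      let sublis := s.2 ++ [k]
      if PySem.Int.mod k 3 = 0 then (s.1 ++ [sublis], []) else (s.1, sublis))
    ([], [])
  st.1

-- ===== PORT B =====
-- B: cuts = [i+1 for i,k in enumerate(ks) if k % 3 == 0]; then [ks[a:b] for a,b in zip([0]+cuts, cuts)].
def chunk_text_keys_alt (keys : List Int) (stepsize : Int) : List (List Int) :=
  let ks := keys
  let cuts := (PySem.List.enumerate ks 0).filterMap
    (fun p => if PySem.Int.mod p.2 3 = 0 then some (p.1 + 1) else none)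
  (List.zip ((0 : Int) :: cuts) cuts).map (fun p => PySem.List.slice ks (some p.1) (some p.2))

-- ===== PRECONDITION & SPEC =====
def Spec_chunk_text_keys (keys : List Int) (stepsize : Int) (out : List (List Int)) : Prop := out = chunk_text_keys_alt keys stepsize
instance (keys : List Int) (stepsize : Int) (out : List (List Int)) : Decidable (Spec_chunk_text_keys keys stepsize out) := by unfold Spec_chunk_text_keys; infer_instance

-- ===== CLAIM (what is proved, stated in full; the proofs are below) =====
def Claim_equal_chunk_text_keys : Prop := ∀ (keys : List Int) (stepsize : Int), Dom_chunk_text_keys keys stepsize → Spec_chunk_text_keys keys stepsize (chunk_text_keys keys stepsize)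

-- ===== LEMMAS AND PROOFS =====

-- reference chunker: process ks with pending sublist acc
def pvF : List Int → List Int → List (List Int)
  | [], _ => []
  | k :: ks, acc =>
      if PySem.Int.mod k 3 = 0 then (acc ++ [k]) :: pvF ks [] else pvF ks (acc ++ [k])

-- cut positions of ks, indices counted from n
def pvCuts (n : Int) : List Int → List Int
  | [] => []
  | k :: ks => if PySem.Int.mod k 3 = 0 then (n + 1) :: pvCuts (n + 1) ks else pvCuts (n + 1) ks

-- consecutive slices of full at the cut list, previous cut = prev
def pvSlices (full : List Int) (prev : Int) : List Int → List (List Int)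
  | [] => []
  | c :: cs => PySem.List.slice full (some prev) (some c) :: pvSlices full c cs

theorem pvA_eq_pvF (ks : List Int) (lis : List (List Int)) (acc : List Int) :
    (ks.foldl
      (fun (s : List (List Int) × List Int) k =>
        let sublis := s.2 ++ [k]
        if PySem.Int.mod k 3 = 0 then (s.1 ++ [sublis], []) else (s.1, sublis))
      (lis, acc)).1 = lis ++ pvF ks acc := by
  induction ks generalizing lis acc with
  | nil => simp [pvF]
  | cons k ks ih =>
    rw [List.foldl_cons, pvF]
    simp only []
    by_cases h : PySem.Int.mod k 3 = 0
    · rw [if_pos h, if_pos h, ih, List.append_assoc]; rfl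
    · rw [if_neg h, if_neg h, ih]

theorem pvCuts_eq (ks : List Int) (n : Int) :
    (PySem.List.enumerate ks n).filterMap
      (fun p => if PySem.Int.mod p.2 3 = 0 then some (p.1 + 1) else none) = pvCuts n ks := by
  induction ks generalizing n with
  | nil => simp [PySem.List.enumerate_nil, pvCuts]
  | cons k ks ih =>
    rw [PySem.List.enumerate_cons, List.filterMap_cons, pvCuts]
    simp only []
    by_cases h : PySem.Int.mod k 3 = 0
    · rw [if_pos h, if_pos h, ih]
    · rw [if_neg h, if_neg h, ih]

theorem pvZip_eq_pvSlices (full : List Int) (cs : List Int) (p : Int) :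
    (List.zip (p :: cs) cs).map (fun q => PySem.List.slice full (some q.1) (some q.2))
      = pvSlices full p cs := by
  induction cs generalizing p with
  | nil => rfl
  | cons c cs ih => rw [pvSlices, List.zip_cons_cons, List.map_cons, ih c]

theorem pvSlices_eq_pvF (ks q p : List Int) :
    pvSlices (q ++ p ++ ks) (q.length : Int)
      (pvCuts ((q.length : Int) + (p.length : Int)) ks) = pvF ks p := by
  induction ks generalizing q p with
  | nil => rfl
  | cons k ks ih =>
    by_cases h : PySem.Int.mod k 3 = 0
    · rw [pvCuts, if_pos h, pvF, if_pos h, pvSlices]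
      congr 1
      · -- the slice from q.length to q.length + p.length + 1 is p ++ [k]
        have : (q.length : Int) + (p.length : Int) + 1
            = (q.length : Int) + ((p.length + 1 : Nat) : Int) := by push_cast; ring
        rw [this, PySem.List.slice_natCast_add]
        rw [List.append_assoc, List.drop_left]
        rw [show p ++ k :: ks = (p ++ [k]) ++ ks by simp,
            show p.length + 1 = (p ++ [k]).length by simp]
        exact List.take_left
      · have htl := ih (q ++ p ++ [k]) []
        simp only [List.length_nil, Nat.cast_zero, add_zero, List.append_nil] at htl
        have e2 : (q.length : Int) + (p.length : Int) + 1
            = ((q ++ p ++ [k]).length : Int) := by simp; ring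
        rw [e2, show q ++ p ++ (k :: ks) = (q ++ p ++ [k]) ++ ks by simp]
        exact htl
    · rw [pvCuts, if_neg h, pvF, if_neg h]
      have e1 : q ++ p ++ (k :: ks) = q ++ (p ++ [k]) ++ ks := by simp
      have e2 : (q.length : Int) + (p.length : Int) + 1
          = (q.length : Int) + ((p ++ [k]).length : Int) := by simp; ring
      rw [e1, e2, ih]

-- ===== VERDICT (by name: the statement is the Claim_ definition above) =====
theorem chunk_text_keys_spec : Claim_equal_chunk_text_keys := by
  intro keys stepsize _
  unfold Spec_chunk_text_keys
  simp only [chunk_text_keys, chunk_text_keys_alt]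
  rw [pvCuts_eq, pvZip_eq_pvSlices]
  have := pvSlices_eq_pvF keys [] []
  simpa using (pvA_eq_pvF keys [] []).trans this.symm
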